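-- pv_equiv track=rewrite | github.com/dylanirlbeck/ethical-moderation-lab | lab/data_tools.py | get_word_validities
-- ===== SOURCE A (Python) =====
-- import string
-- from collections import Counter
--
-- punctuation_translator = str.maketrans('', '', string.punctuation)
--
-- def get_word_validities(data):
--     """
--     A helper function used by DataStats
--     Inputs: An array of tuples (see returns of parse_data)
--     Returns: Two counter objects as a tuple: (valid_counter, invalid_counter)
--         key: word
--         value: how often it has appeared in valid/invalid entries
--     """
--     valid_counter = Counter()
--     invalid_counter = Counter()
--     for validity, title in data:
--         # lowercase, remove punctuation, and split
--         words = preprocess_submission(title)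
--         for w in words:
--             if validity == 'y':
--                 valid_counter[w] += 1
--             elif validity == 'n':
--                 invalid_counter[w] += 1
--     return valid_counter, invalid_counter
--
-- def preprocess_submission(raw):
--     """
--     Helper method used by parse_data to remove punctuation. We wouldn't want "Democrat," "Democrat", "Democrat?" to count as separate words
--     See https://stackoverflow.com/questions/34293875/how-to-remove-punctuation-marks-from-a-string-in-python-3-x-using-translate/34294022
--     """
--     return raw.lower().translate(punctuation_translator).split()
-- ===== SOURCE B (Python) =====
-- import string
-- from collections import Counter
--
-- punctuation_translator = str.maketrans('', '', string.punctuation)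
--
-- def preprocess_submission(raw):
--     return raw.lower().translate(punctuation_translator).split()
--
-- def get_word_validities(data):
--     valid_words = [w for validity, title in data if validity == 'y'
--                    for w in preprocess_submission(title)]
--     invalid_words = [w for validity, title in data if validity == 'n'
--                      for w in preprocess_submission(title)]
--     return Counter(valid_words), Counter(invalid_words)
-- ===== Notes on version B (the rewrite author's own statement) =====
-- stated objective: simpler
-- what changed: B first partitions/flattens the input into two word streams (one per validity) and then builds each Counter in one shot from its stream, instead of A's interleaved per-word increments inside a validity branch.
import Mathlib
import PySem

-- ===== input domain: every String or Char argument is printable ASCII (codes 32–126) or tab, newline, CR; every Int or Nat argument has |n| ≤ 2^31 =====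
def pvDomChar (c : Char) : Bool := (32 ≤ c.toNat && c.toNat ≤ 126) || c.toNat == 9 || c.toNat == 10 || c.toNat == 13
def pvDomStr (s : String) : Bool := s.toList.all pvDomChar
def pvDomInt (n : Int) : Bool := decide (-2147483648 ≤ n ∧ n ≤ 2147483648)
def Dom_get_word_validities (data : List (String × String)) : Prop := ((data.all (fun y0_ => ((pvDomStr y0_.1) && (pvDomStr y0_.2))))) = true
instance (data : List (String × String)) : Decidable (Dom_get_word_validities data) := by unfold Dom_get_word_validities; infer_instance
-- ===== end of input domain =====

-- B groups the words by validity first and then counts each stream at once, instead of A's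
-- interleaved per-word increments inside a validity branch (objective: simpler decomposition).

-- ===== PORT A =====
-- string.punctuation
def pvPunct : List Char := "!\"#$%&'()*+,-./:;<=>?@[\\]^_`{|}~".toList

-- preprocess_submission: lower, translate(delete punctuation) (ported by hand as a char filter,
-- exact since translate with a deletion table deletes exactly those chars), split()
def preprocess_submission (raw : String) : List String :=
  PySem.Str.split₀ (String.ofList (((PySem.Str.lower raw).toList).filter (fun c => !(pvPunct.contains c))))

def get_word_validities (data : List (String × String)) : (List (String × Int)) × (List (String × Int)) :=
  let p :=
    data.foldl (fun (acc : PySem.Dict String Int × PySem.Dict String Int) vt =>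
      let words := preprocess_submission vt.2
      words.foldl (fun acc2 w =>
        if vt.1 == "y" then (acc2.1.modify w 0 (· + 1), acc2.2)
        else if vt.1 == "n" then (acc2.1, acc2.2.modify w 0 (· + 1))
        else acc2) acc)
      (PySem.Dict.empty, PySem.Dict.empty)
  (p.1.items, p.2.items)

-- ===== PORT B =====
def get_word_validities_alt (data : List (String × String)) : (List (String × Int)) × (List (String × Int)) :=
  let valid_words := (data.filter (fun vt => vt.1 == "y")).flatMap (fun vt => preprocess_submission vt.2)
  let invalid_words := (data.filter (fun vt => vt.1 == "n")).flatMap (fun vt => preprocess_submission vt.2)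
  ((PySem.Dict.counter valid_words).items, (PySem.Dict.counter invalid_words).items)

-- ===== PRECONDITION & SPEC =====
def Spec_get_word_validities (data : List (String × String)) (out : (List (String × Int)) × (List (String × Int))) : Prop := out = get_word_validities_alt data
instance (data : List (String × String)) (out : (List (String × Int)) × (List (String × Int))) : Decidable (Spec_get_word_validities data out) := by unfold Spec_get_word_validities; infer_instance

-- ===== CLAIM (what is proved, stated in full; the proofs are below) =====
def Claim_equal_get_word_validities : Prop := ∀ (data : List (String × String)), Dom_get_word_validities data → Spec_get_word_validities data (get_word_validities data)

-- ===== LEMMAS AND PROOFS =====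

-- shorthand for counting a word stream into a dict
def pvCount (d : PySem.Dict String Int) (ws : List String) : PySem.Dict String Int :=
  ws.foldl (fun d w => d.modify w 0 (· + 1)) d

-- A's inner loop, resolved by the (word-independent) validity test
theorem inner_y (v : String) (hv : (v == "y") = true) (ws : List String)
    (acc : PySem.Dict String Int × PySem.Dict String Int) :
    ws.foldl (fun acc2 w =>
        if v == "y" then (acc2.1.modify w 0 (· + 1), acc2.2)
        else if v == "n" then (acc2.1, acc2.2.modify w 0 (· + 1))
        else acc2) acc = (pvCount acc.1 ws, acc.2) := by
  induction ws generalizing acc with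
  | nil => simp [pvCount]
  | cons w ws ih => rw [List.foldl_cons, ih]; simp [pvCount, hv]

theorem inner_n (v : String) (hv : (v == "y") = false) (hn : (v == "n") = true) (ws : List String)
    (acc : PySem.Dict String Int × PySem.Dict String Int) :
    ws.foldl (fun acc2 w =>
        if v == "y" then (acc2.1.modify w 0 (· + 1), acc2.2)
        else if v == "n" then (acc2.1, acc2.2.modify w 0 (· + 1))
        else acc2) acc = (acc.1, pvCount acc.2 ws) := by
  induction ws generalizing acc with
  | nil => simp [pvCount]
  | cons w ws ih => rw [List.foldl_cons, ih]; simp [pvCount, hv, hn]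

theorem inner_other (v : String) (hv : (v == "y") = false) (hn : (v == "n") = false) (ws : List String)
    (acc : PySem.Dict String Int × PySem.Dict String Int) :
    ws.foldl (fun acc2 w =>
        if v == "y" then (acc2.1.modify w 0 (· + 1), acc2.2)
        else if v == "n" then (acc2.1, acc2.2.modify w 0 (· + 1))
        else acc2) acc = acc := by
  induction ws generalizing acc with
  | nil => rfl
  | cons w ws ih => rw [List.foldl_cons, ih]; simp [hv, hn]

-- A's outer loop computes both counters as counts of the two filtered-and-flattened streams
theorem outer_eq (data : List (String × String))
    (acc : PySem.Dict String Int × PySem.Dict String Int) :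
    data.foldl (fun (acc : PySem.Dict String Int × PySem.Dict String Int) vt =>
      (preprocess_submission vt.2).foldl (fun acc2 w =>
        if vt.1 == "y" then (acc2.1.modify w 0 (· + 1), acc2.2)
        else if vt.1 == "n" then (acc2.1, acc2.2.modify w 0 (· + 1))
        else acc2) acc) acc
    = (pvCount acc.1 ((data.filter (fun vt => vt.1 == "y")).flatMap (fun vt => preprocess_submission vt.2)),
       pvCount acc.2 ((data.filter (fun vt => vt.1 == "n")).flatMap (fun vt => preprocess_submission vt.2))) := by
  induction data generalizing acc with
  | nil => simp [pvCount]
  | cons vt rest ih =>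
    rw [List.foldl_cons]
    rcases Bool.eq_false_or_eq_true (vt.1 == "y") with hy | hy
    · have hn : (vt.1 == "n") = false := by
        rcases Bool.eq_false_or_eq_true (vt.1 == "n") with h | h
        · have h1 := beq_iff_eq.mp hy
          have h2 := beq_iff_eq.mp h
          rw [h1] at h2
          exact absurd h2 (by decide)
        · exact h
      rw [inner_y vt.1 hy, ih]
      simp [hy, hn, pvCount, List.foldl_append]
    · rcases Bool.eq_false_or_eq_true (vt.1 == "n") with hn | hn
      · rw [inner_n vt.1 hy hn, ih]
        simp [hy, hn, pvCount, List.foldl_append]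
      · rw [inner_other vt.1 hy hn, ih]
        simp [hy, hn]

theorem counter_eq_pvCount (ws : List String) :
    PySem.Dict.counter ws = pvCount PySem.Dict.empty ws := by
  rfl

-- ===== VERDICT (by name: the statement is the Claim_ definition above) =====
theorem get_word_validities_spec : Claim_equal_get_word_validities := by
  intro data _
  unfold Spec_get_word_validities get_word_validities get_word_validities_alt
  simp only [outer_eq, counter_eq_pvCount]
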